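-- pv_equiv track=rewrite | github.com/LakshyAAAgrawal/simplifi-K-tion | Ksimplifier.py | red_based_on_number_of_literals
-- ===== SOURCE A (Python) =====
-- def number_of_literals(list_of_prime_implicants, solution):
--     '''
--     Input : list_of_all_prime_implicant = list of prime implicants covering the functions(as obtained from prime_implicants), solution = A list consisting of indices corresponding to prime implicants in the list_of_prime_implicants.
--
--     Returns the number of different literals present in the given solution. For this purpose, "w" and "w'" are treated as separate literals.
--     '''
--     literal=[]
--     for i in solution:
--         a=list_of_prime_implicants[i]
--         j=0
--         str_to_add=''
--         while j<len(a):
--             if a[j]=='-':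
--                 None
--             elif a[j]=='0':
--                 lite=['w','x','y','z','a', 'b', 'c'][j]+'\''
--                 if not lite in literal:
--                     literal.append(lite)
--             else:
--                 lite=['w','x','y','z', 'a', 'b', 'c'][j]
--                 if not lite in literal:
--                     literal.append(lite)
--             j=j+1
--     return(len(literal))
--
-- def red_based_on_number_of_literals(list_of_prime_implicant, lis_of_solutions):
--     '''
--     Input : list_of_all_prime_implicant = list of prime implicants covering the functions(as obtained from prime_implicants), lis_of_solutions = a list of lists, with each element(list) representing a possible solution for the given function(as obtained after reducing by the number of terms by the function reduce_to_min_number_of_implicants)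
--
--     This function first checks the number of literals used in each solution and finds the smallest number of literals used in any solution. It then makes a list of all solutions containing the smallest number of literals.
--
--     Returns a list of lists, with each element representing a solution after being reduced for based on number of literals.
--     '''
--     smallest=10000000
--     red_list=[]
--     for i in lis_of_solutions:
--         z=number_of_literals(list_of_prime_implicant, i)
--         if z<smallest:
--             smallest=z
--     for i in lis_of_solutions:
--         if number_of_literals(list_of_prime_implicant, i)==smallest:
--             red_list.append(i)
--     return(red_list)
-- ===== SOURCE B (Python) =====
-- def red_based_on_number_of_literals(list_of_prime_implicant, lis_of_solutions):
--     # Encode each prime implicant once as a 14-bit literal mask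
--     # (bit 2*j   = positive literal of variable j, bit 2*j+1 = negated one),
--     # then bucket solutions by the popcount of the OR of their masks and
--     # return the bucket of the smallest count.
--     masks = []
--     for term in list_of_prime_implicant:
--         m = 0
--         for j, ch in enumerate(term[:7]):
--             if ch != '-':
--                 m |= 1 << (2 * j + (1 if ch == '0' else 0))
--         masks.append(m)
--     buckets = {}
--     for sol in lis_of_solutions:
--         u = 0
--         for i in sol:
--             u |= masks[i]
--         buckets.setdefault(u.bit_count(), []).append(sol)
--     if not buckets:
--         return []
--     return buckets[min(buckets)]
-- ===== Notes on version B (the rewrite author's own statement) =====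
-- stated objective: faster
-- what changed: B replaces A's literal-string lists and repeated number_of_literals scans by a bitmask algorithm: each prime implicant is encoded once as a 14-bit literal mask, a solution's literal count is the popcount of the OR of its masks, and solutions are grouped into a dict keyed by count in one pass, returning the bucket of the minimal key (instead of A's min-then-filter double pass).
import Mathlib
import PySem

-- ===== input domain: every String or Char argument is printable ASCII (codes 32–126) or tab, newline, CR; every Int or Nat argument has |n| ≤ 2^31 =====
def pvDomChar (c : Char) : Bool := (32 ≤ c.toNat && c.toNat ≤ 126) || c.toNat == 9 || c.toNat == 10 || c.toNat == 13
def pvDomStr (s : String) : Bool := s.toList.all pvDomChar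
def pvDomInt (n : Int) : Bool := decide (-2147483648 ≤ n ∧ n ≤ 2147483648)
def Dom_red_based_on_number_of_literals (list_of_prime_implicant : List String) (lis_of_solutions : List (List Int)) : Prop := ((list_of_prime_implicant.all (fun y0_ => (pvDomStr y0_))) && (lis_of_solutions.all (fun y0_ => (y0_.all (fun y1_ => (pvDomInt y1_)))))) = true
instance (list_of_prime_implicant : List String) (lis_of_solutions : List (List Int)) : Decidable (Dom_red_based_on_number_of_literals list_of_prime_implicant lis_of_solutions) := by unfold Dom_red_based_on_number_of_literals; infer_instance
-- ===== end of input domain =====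

-- B replaces A's literal-string lists and double min-then-filter scan by a bitmask algorithm:
-- each implicant becomes a 14-bit mask once, a solution's count is the popcount of the OR of its
-- masks, and solutions are bucketed by count in one pass; the bucket of the minimal key is returned.

-- ===== PORT A =====
-- Strings are handled on the List Char level (PySem.Chars is PySem's definition layer for str).
def pvLetters : List (List Char) := [['w'], ['x'], ['y'], ['z'], ['a'], ['b'], ['c']]

-- loop body of number_of_literals' while-loop (p = (j, a[j]); the while over j is the fold over enumerate)
def pvStepA (lit : List (List Char)) (p : Int × Char) : List (List Char) :=
  if p.2 = '-' then lit
  else if p.2 = '0' then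
    let lite := PySem.List.pyGetD pvLetters p.1 [] ++ ['\'']
    if lite ∈ lit then lit else lit ++ [lite]
  else
    let lite := PySem.List.pyGetD pvLetters p.1 []
    if lite ∈ lit then lit else lit ++ [lite]

-- transliteration of number_of_literals
def pvNumLit (list_of_prime_implicants : List String) (solution : List Int) : Int :=
  let literal : List (List Char) :=
    solution.foldl (fun literal i =>
      let a := (PySem.List.pyGetD list_of_prime_implicants i "").toList
      (PySem.List.enumerate a).foldl pvStepA literal) []
  (literal.length : Int)

def red_based_on_number_of_literals (list_of_prime_implicant : List String) (lis_of_solutions : List (List Int)) : List (List Int) :=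
  let smallest : Int :=
    lis_of_solutions.foldl (fun smallest i =>
      let z := pvNumLit list_of_prime_implicant i
      if z < smallest then z else smallest) 10000000
  lis_of_solutions.foldl (fun red_list i =>
    if pvNumLit list_of_prime_implicant i = smallest then red_list ++ [i] else red_list) []

-- ===== PORT B =====
-- inner loop of B's mask builder: set bit 2*j + (1 if ch=='0' else 0); the enumerate index is
-- ≥ 0, so '.toNat' of the shift amount is exact for Python's '1 << (...)'
def pvStepM (m : Int) (p : Int × Char) : Int :=
  if p.2 ≠ '-' then
    PySem.Int.bor m ((1 : Int) <<< (2 * p.1 + (if p.2 = '0' then 1 else 0)).toNat)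
  else m

-- mask of one prime implicant (the body of B's first loop; term[:7] is the slice)
def pvMaskOf (term : String) : Int :=
  (PySem.List.enumerate (PySem.List.slice term.toList none (some 7))).foldl pvStepM 0

def red_based_on_number_of_literals_alt (list_of_prime_implicant : List String) (lis_of_solutions : List (List Int)) : List (List Int) :=
  let masks : List Int := list_of_prime_implicant.foldl (fun acc term => acc ++ [pvMaskOf term]) []
  let buckets : PySem.Dict Int (List (List Int)) :=
    lis_of_solutions.foldl (fun d sol =>
      let u : Int := sol.foldl (fun u i => PySem.Int.bor u (PySem.List.pyGetD masks i 0)) 0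
      d.modify ((PySem.Int.bitCount u : Nat) : Int) [] (· ++ [sol])) PySem.Dict.empty
  if PySem.Dict.size buckets = 0 then []
  else buckets.getD ((PySem.List.min? buckets.keys (fun k => k)).getD 0) []

-- ===== PRECONDITION & SPEC =====
-- Pre_ excludes exactly the inputs where the Python A raises IndexError: a solution index out of
-- range of list_of_prime_implicant, or an accessed implicant with a non-'-' character at a
-- position ≥ 7 (beyond A's 7-entry letter table).
def Pre_red_based_on_number_of_literals (list_of_prime_implicant : List String) (lis_of_solutions : List (List Int)) : Prop :=
  ∀ sol ∈ lis_of_solutions, ∀ i ∈ sol,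
    PySem.Raise.InRange list_of_prime_implicant.length i ∧
    ((PySem.List.pyGetD list_of_prime_implicant i "").toList.drop 7).all (· = '-') = true
instance (list_of_prime_implicant : List String) (lis_of_solutions : List (List Int)) : Decidable (Pre_red_based_on_number_of_literals list_of_prime_implicant lis_of_solutions) := by unfold Pre_red_based_on_number_of_literals; infer_instance

def pvWitness_red_based_on_number_of_literals : List String × List (List Int) :=
  (["0-1", "10-"], [[0], [1], [0, 1]])

def Spec_red_based_on_number_of_literals (list_of_prime_implicant : List String) (lis_of_solutions : List (List Int)) (out : List (List Int)) : Prop := out = red_based_on_number_of_literals_alt list_of_prime_implicant lis_of_solutions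
instance (list_of_prime_implicant : List String) (lis_of_solutions : List (List Int)) (out : List (List Int)) : Decidable (Spec_red_based_on_number_of_literals list_of_prime_implicant lis_of_solutions out) := by unfold Spec_red_based_on_number_of_literals; infer_instance

-- ===== CLAIM (what is proved, stated in full; the proofs are below) =====
def Claim_equal_red_based_on_number_of_literals : Prop := ∀ (list_of_prime_implicant : List String) (lis_of_solutions : List (List Int)), Dom_red_based_on_number_of_literals list_of_prime_implicant lis_of_solutions → Pre_red_based_on_number_of_literals list_of_prime_implicant lis_of_solutions → Spec_red_based_on_number_of_literals list_of_prime_implicant lis_of_solutions (red_based_on_number_of_literals list_of_prime_implicant lis_of_solutions)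


-- ===== LEMMAS AND PROOFS =====
-- bit code of one enumerate entry (the shift amount of pvStepM)
def pvCode (p : Int × Char) : Nat := (2 * p.1 + (if p.2 = '0' then 1 else 0)).toNat

-- decode a bit code back to A's literal string
def pvDec (k : Nat) : List Char :=
  if k % 2 = 1 then [PySem.List.pyGetD "wxyzabc".toList ((k / 2 : Nat) : Int) '?', '\'']
  else [PySem.List.pyGetD "wxyzabc".toList ((k / 2 : Nat) : Int) '?']

-- does implicant cs contribute bit t? (extensional description of pvMaskOf)
def pvBitOn (cs : List Char) (t : Nat) : Bool :=
  (PySem.List.enumerate (cs.take 7)).any (fun p => p.2 ≠ '-' && pvCode p == t)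

-- does some implicant of sol contribute bit t? (extensional description of B's u)
def pvSolBit (lpi : List String) (sol : List Int) (t : Nat) : Bool :=
  sol.any (fun i => pvBitOn (PySem.List.pyGetD lpi i "").toList t)

-- B's u for one solution, masks already resolved through the map
def pvUOf (lpi : List String) (sol : List Int) : Int :=
  sol.foldl (fun u i => PySem.Int.bor u (pvMaskOf (PySem.List.pyGetD lpi i ""))) 0

-- indices of non-'-' characters of an admitted implicant are < 7
theorem pvIdx_lt (a : List Char) (ha : (a.drop 7).all (· = '-') = true) :
    ∀ p ∈ PySem.List.enumerate a, p.2 ≠ '-' → ∃ k : Nat, p.1 = (k : Int) ∧ k < 7 := by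
  intro p hp hne
  rw [PySem.List.mem_enumerate_iff] at hp
  obtain ⟨k, hk, rfl⟩ := hp
  refine ⟨k, by simp, ?_⟩
  by_contra h7
  rw [Nat.not_lt] at h7
  have hmem : a[k] ∈ a.drop 7 := by
    have : a[k] = (a.drop 7)[k - 7]'(by simp [List.length_drop]; omega) := by
      rw [List.getElem_drop]; congr 1; omega
    rw [this]; exact List.getElem_mem _
  exact hne (by simpa using List.all_eq_true.mp ha _ hmem)

-- the literal A appends for a non-'-' entry is pvDec of its code, and the code is < 14
theorem pvLite_eq (p : Int × Char) (k : Nat) (hk1 : p.1 = (k : Int)) (hk7 : k < 7) :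
    pvCode p < 14 ∧
    (if p.2 = '0' then PySem.List.pyGetD pvLetters p.1 [] ++ ['\'']
     else PySem.List.pyGetD pvLetters p.1 []) = pvDec (pvCode p) := by
  obtain ⟨i, c⟩ := p
  simp only at hk1
  subst hk1
  have hcode : pvCode ((k : Int), c) = 2 * k + (if c = '0' then 1 else 0) := by
    unfold pvCode; split_ifs <;> simp only <;> omega
  constructor
  · rw [hcode]; split_ifs <;> omega
  · rw [hcode]
    by_cases h0 : c = '0'
    · subst h0; rw [if_pos rfl, if_pos rfl]; dsimp only; interval_cases k <;> decide
    · rw [if_neg h0, if_neg h0]; dsimp only; interval_cases k <;> decide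

-- A's inner per-character fold: nodup is kept and membership accumulates the decoded codes
theorem pvA_inner (L : List (Int × Char))
    (hL : ∀ p ∈ L, p.2 ≠ '-' → ∃ k : Nat, p.1 = (k : Int) ∧ k < 7)
    (s : List (List Char)) (hnd : s.Nodup) :
    (L.foldl pvStepA s).Nodup ∧
    ∀ x, x ∈ L.foldl pvStepA s ↔ x ∈ s ∨ ∃ p ∈ L, p.2 ≠ '-' ∧ x = pvDec (pvCode p) := by
  induction L generalizing s with
  | nil => exact ⟨hnd, fun x => by simp⟩
  | cons p L ih =>
    have hLt : ∀ q ∈ L, q.2 ≠ '-' → ∃ k : Nat, q.1 = (k : Int) ∧ k < 7 :=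
      fun q hq h => hL q (List.mem_cons_of_mem _ hq) h
    by_cases hd : p.2 = '-'
    · have hstep : pvStepA s p = s := by simp [pvStepA, hd]
      simp only [List.foldl_cons, hstep]
      obtain ⟨h1, h2⟩ := ih hLt s hnd
      refine ⟨h1, fun x => ?_⟩
      rw [h2 x, List.exists_mem_cons_iff]
      tauto
    · obtain ⟨k, hk1, hk7⟩ := hL p List.mem_cons_self hd
      obtain ⟨_, hlite⟩ := pvLite_eq p k hk1 hk7
      have hstep : pvStepA s p =
          if pvDec (pvCode p) ∈ s then s else s ++ [pvDec (pvCode p)] := by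
        simp only [pvStepA, if_neg hd]
        by_cases h0 : p.2 = '0'
        · rw [if_pos h0] at hlite ⊢; rw [hlite]
        · rw [if_neg h0] at hlite ⊢; rw [hlite]
      have hnd' : (if pvDec (pvCode p) ∈ s then s else s ++ [pvDec (pvCode p)]).Nodup := by
        split_ifs with h
        · exact hnd
        · refine List.Nodup.append hnd (List.nodup_singleton _) ?_
          intro a ha hb
          simp only [List.mem_singleton] at hb
          subst hb
          exact h ha
      obtain ⟨h1, h2⟩ := ih hLt _ hnd'
      simp only [List.foldl_cons, hstep]
      refine ⟨h1, fun x => ?_⟩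
      rw [h2 x, List.exists_mem_cons_iff]
      have hmem' : x ∈ (if pvDec (pvCode p) ∈ s then s else s ++ [pvDec (pvCode p)]) ↔
          x ∈ s ∨ x = pvDec (pvCode p) := by
        split_ifs with h
        · constructor
          · exact Or.inl
          · rintro (hx | rfl)
            · exact hx
            · exact h
        · simp
      rw [hmem']
      tauto

-- A's outer fold over the solution
theorem pvA_sol (lpi : List String) (sol : List Int)
    (h : ∀ i ∈ sol, ((PySem.List.pyGetD lpi i "").toList.drop 7).all (· = '-') = true)
    (s : List (List Char)) (hnd : s.Nodup) :
    (sol.foldl (fun literal i =>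
        (PySem.List.enumerate (PySem.List.pyGetD lpi i "").toList).foldl pvStepA literal) s).Nodup ∧
    ∀ x, x ∈ sol.foldl (fun literal i =>
        (PySem.List.enumerate (PySem.List.pyGetD lpi i "").toList).foldl pvStepA literal) s ↔
      x ∈ s ∨ ∃ i ∈ sol, ∃ p ∈ PySem.List.enumerate (PySem.List.pyGetD lpi i "").toList,
        p.2 ≠ '-' ∧ x = pvDec (pvCode p) := by
  induction sol generalizing s with
  | nil => exact ⟨hnd, fun x => by simp⟩
  | cons i sol ih =>
    have hi := h i List.mem_cons_self
    obtain ⟨h1, h2⟩ := pvA_inner (PySem.List.enumerate (PySem.List.pyGetD lpi i "").toList)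
      (pvIdx_lt _ hi) s hnd
    obtain ⟨h3, h4⟩ := ih (fun j hj => h j (List.mem_cons_of_mem _ hj)) _ h1
    simp only [List.foldl_cons]
    refine ⟨h3, fun x => ?_⟩
    rw [h4 x, h2 x, List.exists_mem_cons_iff]
    exact or_assoc

-- B's mask fold is a Nat whose bits are pvBitOn
theorem pvMask_bits (term : String) :
    ∃ m : Nat, pvMaskOf term = (m : Int) ∧ ∀ t, m.testBit t = pvBitOn term.toList t := by
  have aux : ∀ (L : List (Int × Char)) (m0 : Nat),
      ∃ m : Nat, L.foldl pvStepM (m0 : Int) = (m : Int) ∧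
        ∀ t, m.testBit t = (m0.testBit t || L.any (fun p => p.2 ≠ '-' && pvCode p == t)) := by
    intro L
    induction L with
    | nil => exact fun m0 => ⟨m0, rfl, fun t => by simp⟩
    | cons p L ih =>
      intro m0
      by_cases hd : p.2 = '-'
      · have hstep : pvStepM (m0 : Int) p = (m0 : Int) := by simp [pvStepM, hd]
        obtain ⟨m, hm, hchar⟩ := ih m0
        refine ⟨m, by simp only [List.foldl_cons, hstep, hm], fun t => ?_⟩
        rw [hchar t]
        simp [hd]
      · have hstep : pvStepM (m0 : Int) p = ((m0 ||| (1 <<< pvCode p) : Nat) : Int) := by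
          simp only [pvStepM, if_pos hd]
          show PySem.Int.bor (m0 : Int) (((1 <<< pvCode p : Nat)) : Int) = _
          exact PySem.Int.bor_natCast m0 (1 <<< pvCode p)
        obtain ⟨m, hm, hchar⟩ := ih (m0 ||| (1 <<< pvCode p))
        refine ⟨m, by simp only [List.foldl_cons, hstep, hm], fun t => ?_⟩
        rw [hchar t]
        simp only [List.any_cons, Nat.testBit_or, Nat.one_shiftLeft, Nat.testBit_two_pow]
        cases h1 : m0.testBit t <;> cases h2 : decide (pvCode p = t) <;>
          simp_all
  unfold pvMaskOf pvBitOn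
  have hsl : PySem.List.slice term.toList none (some 7) = List.take 7 term.toList := by
    rw [PySem.List.slice_to term.toList (by norm_num)]
    rfl
  rw [hsl]
  obtain ⟨m, hm, hchar⟩ := aux (PySem.List.enumerate (List.take 7 term.toList)) 0
  refine ⟨m, by exact_mod_cast hm, fun t => ?_⟩
  rw [hchar t]
  simp [Nat.zero_testBit]

-- B's u fold is a Nat whose bits are pvSolBit
theorem pvU_bits (lpi : List String) (sol : List Int) :
    ∃ u : Nat, pvUOf lpi sol = (u : Int) ∧ ∀ t, u.testBit t = pvSolBit lpi sol t := by
  have aux : ∀ (sol : List Int) (u0 : Nat),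
      ∃ u : Nat, sol.foldl (fun u i => PySem.Int.bor u (pvMaskOf (PySem.List.pyGetD lpi i ""))) (u0 : Int) = (u : Int) ∧
        ∀ t, u.testBit t = (u0.testBit t || sol.any (fun i => pvBitOn (PySem.List.pyGetD lpi i "").toList t)) := by
    intro sol
    induction sol with
    | nil => exact fun u0 => ⟨u0, rfl, fun t => by simp⟩
    | cons i sol ih =>
      intro u0
      obtain ⟨m, hm, hmchar⟩ := pvMask_bits (PySem.List.pyGetD lpi i "")
      have hstep : PySem.Int.bor (u0 : Int) (pvMaskOf (PySem.List.pyGetD lpi i ""))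
          = ((u0 ||| m : Nat) : Int) := by
        rw [hm]; simp [PySem.Int.bor_natCast]
      obtain ⟨u, hu, huchar⟩ := ih (u0 ||| m)
      refine ⟨u, by simp only [List.foldl_cons, hstep, hu], fun t => ?_⟩
      rw [huchar t]
      simp only [List.any_cons, Nat.testBit_or, hmchar t]
      cases u0.testBit t <;> simp
  obtain ⟨u, hu, huchar⟩ := aux sol 0
  refine ⟨u, by exact_mod_cast hu, fun t => ?_⟩
  rw [huchar t]
  simp [Nat.zero_testBit, pvSolBit]

-- codes contributed by any implicant are < 14
theorem pvBitOn_lt (cs : List Char) (t : Nat) (h : pvBitOn cs t = true) : t < 14 := by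
  unfold pvBitOn at h
  rw [List.any_eq_true] at h
  obtain ⟨p, hp, hcond⟩ := h
  rw [Bool.and_eq_true, beq_iff_eq] at hcond
  rw [PySem.List.mem_enumerate_iff] at hp
  obtain ⟨j, hj, rfl⟩ := hp
  have hj7 : j < 7 := lt_of_lt_of_le hj (by simp)
  rw [← hcond.2]
  simp only [pvCode]
  split_ifs <;> omega

-- bit_count of a Nat below 2^B counts its set bits among 0..B-1
theorem pvBitCount_eq (B : Nat) (n : Nat) (h : n < 2 ^ B) :
    PySem.Int.bitCount (n : Int) = ((List.range B).filter (fun t => n.testBit t)).length := by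
  induction B generalizing n with
  | zero =>
    interval_cases n
    simp [PySem.Int.bitCount_zero]
  | succ B ih =>
    rcases Nat.eq_zero_or_pos n with rfl | hn
    · simp [PySem.Int.bitCount_zero, Nat.zero_testBit]
    · rw [PySem.Int.bitCount_natCast hn, ih (n / 2) (by omega)]
      have hmap : (List.filter (fun t => n.testBit t) (List.map (· + 1) (List.range B))).length
          = (List.filter (fun t => (n / 2).testBit t) (List.range B)).length := by
        rw [List.filter_map, List.length_map]
        congr 1
        apply List.filter_congr
        intro t _
        simp only [Function.comp_apply]
        exact Nat.testBit_succ n t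
      rw [List.range_succ_eq_map, List.filter_cons]
      by_cases hb : n.testBit 0 = true
      · have h1 : n % 2 = 1 := by
          rw [Nat.testBit_zero, decide_eq_true_eq] at hb; exact hb
        rw [if_pos hb]
        simp only [List.length_cons, hmap]
        omega
      · have h1 : n % 2 = 0 := by
          rw [Nat.testBit_zero, decide_eq_true_eq] at hb; omega
        rw [if_neg hb, hmap]
        omega

-- a non-'-' position of an admitted implicant is already inside the first 7 characters
theorem pvEnum_take (cs : List Char) (hcs : (cs.drop 7).all (· = '-') = true) (x : List Char) :
    (∃ p ∈ PySem.List.enumerate cs, p.2 ≠ '-' ∧ x = pvDec (pvCode p)) ↔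
    (∃ p ∈ PySem.List.enumerate (cs.take 7), p.2 ≠ '-' ∧ x = pvDec (pvCode p)) := by
  constructor
  · rintro ⟨p, hp, hne, rfl⟩
    rw [PySem.List.mem_enumerate_iff] at hp
    obtain ⟨k, hk, rfl⟩ := hp
    have hk7 : k < 7 := by
      by_contra h7
      rw [Nat.not_lt] at h7
      have hmem : cs[k] ∈ cs.drop 7 := by
        have : cs[k] = (cs.drop 7)[k - 7]'(by simp [List.length_drop]; omega) := by
          rw [List.getElem_drop]; congr 1; omega
        rw [this]; exact List.getElem_mem _
      exact hne (by simpa using List.all_eq_true.mp hcs _ hmem)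
    refine ⟨((0 : Int) + (k : Int), cs[k]), ?_, hne, rfl⟩
    rw [PySem.List.mem_enumerate_iff]
    refine ⟨k, by simp [List.length_take]; omega, ?_⟩
    simp [List.getElem_take]
  · rintro ⟨p, hp, hne, rfl⟩
    rw [PySem.List.mem_enumerate_iff] at hp
    obtain ⟨k, hk, rfl⟩ := hp
    have hk' : k < cs.length := by
      simp only [List.length_take] at hk; omega
    have hel : (cs.take 7)[k] = cs[k]'hk' := List.getElem_take
    refine ⟨((0 : Int) + (k : Int), cs[k]'hk'), ?_, ?_, ?_⟩
    · rw [PySem.List.mem_enumerate_iff]; exact ⟨k, hk', rfl⟩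
    · simpa [hel] using hne
    · rw [show ((0 : Int) + (k : Int), cs[k]'hk') = ((0 : Int) + (k : Int), (cs.take 7)[k]) from by rw [hel]]

-- per solution: A's count is the popcount of B's mask union, and it is ≤ 14
theorem pvCount_eq (lpi : List String) (sol : List Int)
    (h : ∀ i ∈ sol, PySem.Raise.InRange lpi.length i ∧
        ((PySem.List.pyGetD lpi i "").toList.drop 7).all (· = '-') = true) :
    pvNumLit lpi sol = ((PySem.Int.bitCount (pvUOf lpi sol) : Nat) : Int) ∧
    pvNumLit lpi sol ≤ 14 := by
  obtain ⟨hnd, hmem⟩ := pvA_sol lpi sol (fun i hi => (h i hi).2) [] List.nodup_nil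
  obtain ⟨u, hu, hchar⟩ := pvU_bits lpi sol
  have hbit14 : ∀ t, u.testBit t = true → t < 14 := by
    intro t ht
    rw [hchar t] at ht
    unfold pvSolBit at ht
    rw [List.any_eq_true] at ht
    obtain ⟨i, _, hb⟩ := ht
    exact pvBitOn_lt _ _ hb
  have hu14 : u < 2 ^ 14 := by
    refine Nat.lt_pow_two_of_testBit u (fun i hi => ?_)
    cases hb : u.testBit i
    · rfl
    · exact absurd (hbit14 i hb) (by omega)
  have hTnd : (((List.range 14).filter (fun t => u.testBit t)).map pvDec).Nodup := by
    refine (List.nodup_range.filter _).map_on ?_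
    intro a ha b hb hab
    have ha14 : a < 14 := List.mem_range.mp (List.mem_of_mem_filter ha)
    have hb14 : b < 14 := List.mem_range.mp (List.mem_of_mem_filter hb)
    have hinj : ∀ a : Nat, a < 14 → ∀ b : Nat, b < 14 → pvDec a = pvDec b → a = b := by decide
    exact hinj a ha14 b hb14 hab
  have hperm : (sol.foldl (fun literal i =>
      (PySem.List.enumerate (PySem.List.pyGetD lpi i "").toList).foldl pvStepA literal) []).Perm
      (((List.range 14).filter (fun t => u.testBit t)).map pvDec) := by
    rw [List.perm_ext_iff_of_nodup hnd hTnd]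
    intro x
    rw [hmem x]
    simp only [List.not_mem_nil, false_or]
    constructor
    · rintro ⟨i, hi, hp⟩
      rw [pvEnum_take _ (h i hi).2 x] at hp
      obtain ⟨p, hp', hne, rfl⟩ := hp
      refine List.mem_map.mpr ⟨pvCode p, ?_, rfl⟩
      have hbit : pvBitOn (PySem.List.pyGetD lpi i "").toList (pvCode p) = true := by
        unfold pvBitOn
        rw [List.any_eq_true]
        exact ⟨p, hp', by simp [hne]⟩
      have ht : u.testBit (pvCode p) = true := by
        rw [hchar]
        unfold pvSolBit
        rw [List.any_eq_true]
        exact ⟨i, hi, hbit⟩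
      exact List.mem_filter.mpr ⟨List.mem_range.mpr (pvBitOn_lt _ _ hbit), ht⟩
    · intro hx
      obtain ⟨t, ht, rfl⟩ := List.mem_map.mp hx
      have htb : u.testBit t = true := (List.mem_filter.mp ht).2
      rw [hchar] at htb
      unfold pvSolBit at htb
      rw [List.any_eq_true] at htb
      obtain ⟨i, hi, hb⟩ := htb
      unfold pvBitOn at hb
      rw [List.any_eq_true] at hb
      obtain ⟨p, hp, hcond⟩ := hb
      rw [Bool.and_eq_true, decide_eq_true_eq, beq_iff_eq] at hcond
      refine ⟨i, hi, ?_⟩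
      rw [pvEnum_take _ (h i hi).2]
      exact ⟨p, hp, hcond.1, by rw [hcond.2]⟩
  have hlen := hperm.length_eq
  rw [List.length_map] at hlen
  have h1 : pvNumLit lpi sol = ((sol.foldl (fun literal i =>
      (PySem.List.enumerate (PySem.List.pyGetD lpi i "").toList).foldl pvStepA literal) []).length : Int) := rfl
  constructor
  · rw [h1, hlen]
    unfold pvUOf at hu ⊢
    rw [hu, pvBitCount_eq 14 u hu14]
  · rw [h1, hlen]
    have hle : ((List.range 14).filter (fun t => u.testBit t)).length ≤ 14 := by
      calc ((List.range 14).filter (fun t => u.testBit t)).length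
          ≤ (List.range 14).length := List.length_filter_le _ _
        _ = 14 := by simp
    exact_mod_cast hle

-- A's running minimum step is min
theorem pvFoldl_min (l : List (List Int)) (f : List Int → Int) (c : Int) :
    l.foldl (fun s i => if f i < s then f i else s) c = (l.map f).foldl min c := by
  rw [List.foldl_map]
  refine PySem.List.foldl_congr_mem _ _ _ _ (fun s x _ => ?_)
  rw [min_def]
  split_ifs <;> omega

-- min over the deduplicated key list is min over the original list
theorem pvMin_ofList (l : List Int) (hl : l ≠ []) :
    PySem.List.min? (PySem.Set.ofList l) (fun k => k) = PySem.List.min? l (fun k => k) := by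
  obtain ⟨x, t, rfl⟩ := List.exists_cons_of_ne_nil hl
  have h1 : ∃ m1, PySem.List.min? (PySem.Set.ofList (x :: t)) (fun k => k) = some m1 := by
    cases hm : PySem.List.min? (PySem.Set.ofList (x :: t)) (fun k => k) with
    | none =>
      rw [PySem.List.min?_eq_none_iff] at hm
      have : x ∈ PySem.Set.ofList (x :: t) := (PySem.Set.mem_ofList _ _).mpr List.mem_cons_self
      simp [hm] at this
    | some m => exact ⟨m, rfl⟩
  obtain ⟨m1, hm1⟩ := h1
  obtain ⟨m2, hm2⟩ : ∃ m2, PySem.List.min? (x :: t) (fun k => k) = some m2 :=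
    ⟨t.foldl min x, PySem.List.min?_id_cons x t⟩
  rw [hm1, hm2]
  have hmem1 : m1 ∈ x :: t := (PySem.Set.mem_ofList _ _).mp (PySem.List.min?_mem hm1)
  have hmem2 : m2 ∈ PySem.Set.ofList (x :: t) := (PySem.Set.mem_ofList _ _).mpr (PySem.List.min?_mem hm2)
  have h12 : m1 ≤ m2 := PySem.List.min?_isMin hm1 _ hmem2
  have h21 : m2 ≤ m1 := PySem.List.min?_isMin hm2 _ hmem1
  rw [le_antisymm h12 h21]

-- B's bucket dict with masks resolved (pyGetD through the map) — used to restate the alt port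
def pvBuckets (lpi : List String) (lis : List (List Int)) : PySem.Dict Int (List (List Int)) :=
  lis.foldl (fun d sol =>
    d.modify ((PySem.Int.bitCount (pvUOf lpi sol) : Nat) : Int) [] (· ++ [sol])) PySem.Dict.empty

theorem pvAlt_eq (lpi : List String) (lis : List (List Int)) :
    red_based_on_number_of_literals_alt lpi lis =
      (if (pvBuckets lpi lis).size = 0 then []
       else (pvBuckets lpi lis).getD
         ((PySem.List.min? (pvBuckets lpi lis).keys (fun k => k)).getD 0) []) := by
  have hmasks : lpi.foldl (fun acc term => acc ++ [pvMaskOf term]) [] = lpi.map pvMaskOf := by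
    rw [PySem.List.foldl_append_singleton_eq_map]
    rfl
  have hkey : ∀ sol : List Int,
      sol.foldl (fun u i => PySem.Int.bor u (PySem.List.pyGetD (lpi.map pvMaskOf) i 0)) 0
        = pvUOf lpi sol := by
    intro sol
    unfold pvUOf
    refine PySem.List.foldl_congr_mem _ _ _ _ (fun u i _ => ?_)
    congr 1
    rw [show (0 : Int) = pvMaskOf "" from rfl, PySem.List.pyGetD_map pvMaskOf lpi i ""]
  unfold red_based_on_number_of_literals_alt pvBuckets
  simp only [hmasks, hkey]

theorem red_spec_aux (lpi : List String) (lis : List (List Int))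
    (hpre : Pre_red_based_on_number_of_literals lpi lis) :
    red_based_on_number_of_literals lpi lis = red_based_on_number_of_literals_alt lpi lis := by
  rw [pvAlt_eq]
  cases lis with
  | nil => rfl
  | cons x t =>
    have hfg : ∀ sol ∈ x :: t, ((PySem.Int.bitCount (pvUOf lpi sol) : Nat) : Int) = pvNumLit lpi sol :=
      fun sol hs => ((pvCount_eq lpi sol (hpre sol hs)).1).symm
    have hf14 : ∀ sol ∈ x :: t, pvNumLit lpi sol ≤ 14 :=
      fun sol hs => (pvCount_eq lpi sol (hpre sol hs)).2
    -- buckets as a grouping fold over (count, solution) pairs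
    have hb : pvBuckets lpi (x :: t)
        = ((x :: t).map (fun s => (pvNumLit lpi s, s))).foldl
            (fun d p => d.modify p.1 [] (· ++ [p.2])) PySem.Dict.empty := by
      unfold pvBuckets
      rw [List.foldl_map]
      refine PySem.List.foldl_congr_mem _ _ _ _ (fun d sol hs => ?_)
      rw [hfg sol hs]
    have hkeys : (pvBuckets lpi (x :: t)).keys
        = PySem.Set.ofList ((x :: t).map (pvNumLit lpi)) := by
      rw [hb, PySem.Dict.keys_foldl_modify_key]
      rw [PySem.Dict.keys_empty, List.map_map]
      rw [PySem.Set.ofList_eq_foldl]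
      rfl
    -- the minimal count
    have hmin : PySem.List.min? ((x :: t).map (pvNumLit lpi)) (fun k => k)
        = some ((t.map (pvNumLit lpi)).foldl min (pvNumLit lpi x)) := by
      rw [List.map_cons, PySem.List.min?_id_cons]
    have hsz : ¬ ((pvBuckets lpi (x :: t)).size = 0) := by
      intro h0
      have hkl : (pvBuckets lpi (x :: t)).keys.length = (pvBuckets lpi (x :: t)).size := by
        simp [PySem.Dict.keys, PySem.Dict.size]
      have hm : pvNumLit lpi x ∈ (pvBuckets lpi (x :: t)).keys := by
        rw [hkeys]
        exact (PySem.Set.mem_ofList _ _).mpr (by simp)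
      have := List.length_pos_of_mem hm
      omega
    rw [if_neg hsz]
    have hminkeys : (PySem.List.min? (pvBuckets lpi (x :: t)).keys (fun k => k)).getD 0
        = (t.map (pvNumLit lpi)).foldl min (pvNumLit lpi x) := by
      rw [hkeys, pvMin_ofList _ (by simp), hmin]
      rfl
    rw [hminkeys]
    -- A's smallest is the same minimum
    have hsm : (x :: t).foldl (fun smallest i =>
        if pvNumLit lpi i < smallest then pvNumLit lpi i else smallest) 10000000
        = (t.map (pvNumLit lpi)).foldl min (pvNumLit lpi x) := by
      rw [pvFoldl_min _ (pvNumLit lpi)]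
      rw [List.map_cons, List.foldl_cons]
      congr 1
      have := hf14 x List.mem_cons_self
      rw [min_def]
      split_ifs <;> omega
    -- evaluate both sides
    unfold red_based_on_number_of_literals
    rw [hsm]
    rw [PySem.List.foldl_append_ite_eq_filter
      (fun i => pvNumLit lpi i = (t.map (pvNumLit lpi)).foldl min (pvNumLit lpi x))]
    rw [hb, PySem.Dict.getD_foldl_modify_append, PySem.Dict.getD_empty]
    rw [List.filter_map]
    simp only [List.map_map, List.nil_append]
    rw [show ((fun p => p.1 == (t.map (pvNumLit lpi)).foldl min (pvNumLit lpi x))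
        ∘ (fun s => (pvNumLit lpi s, s)))
      = (fun s => pvNumLit lpi s == (t.map (pvNumLit lpi)).foldl min (pvNumLit lpi x)) from rfl]
    rw [show ((fun (p : Int × List Int) => p.2) ∘ (fun s => (pvNumLit lpi s, s)))
      = (fun (s : List Int) => s) from rfl]
    rw [List.map_id']
    apply List.filter_congr
    intro i _
    by_cases h : pvNumLit lpi i = (t.map (pvNumLit lpi)).foldl min (pvNumLit lpi x) <;> simp [h]

-- ===== VERDICT (by name: the statement is the Claim_ definition above) =====
theorem red_based_on_number_of_literals_spec : Claim_equal_red_based_on_number_of_literals := by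
  intro lpi lis _ hpre
  exact red_spec_aux lpi lis hpre
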